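-- pv_equiv track=rewrite | github.com/joshanashakya/dissertation | workspace/dataset/java-python/GeeksForGeeks/1995/A/2.py | countPrimePairs
-- ===== SOURCE A (Python) =====
-- def SieveOfSundaram(marked, nNew):
--
--     # Main logic of Sundaram. Mark all numbers
--     # of the form i + j + 2ij as true where
--     # 1 <= i <= j
--     for i in range(1, nNew + 1):
--         for j in range(i, nNew):
--             if i + j + 2 * i * j > nNew:
--                 break
--             marked[i + j + 2 * i * j] = True
--
-- def countPrimePairs(n):
--
--     # In general Sieve of Sundaram, produces
--     # primes smaller than (2*x + 2) for a number
--     # given number x. Since we want primes smaller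
--     # than n, we reduce n to half
--     nNew = (n - 2) // 2
--
--     # This array is used to separate numbers
--     # of the form i+j+2ij from others where
--     # 1 <= i <= j
--     marked = [ False for i in range(nNew + 1)]
--
--     SieveOfSundaram(marked, nNew)
--
--     count, prime_num = 0, 0
--
--     # Find primes. Primes are of the form
--     # 2*i + 1 such that marked[i] is false.
--     for i in range(1, nNew + 1):
--         if (marked[i] == False):
--
--             prime_num = 2 * i + 1
--
--             # For a given prime number p
--             # number of distinct pairs(i,j)
--             # where (i+j) = p are p/2
--             count = count + (prime_num // 2)
--
--     return count
-- ===== SOURCE B (Python) =====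
-- def countPrimePairs(n):
--     # Trial division: for each odd candidate p = 2*i + 1 below the Sundaram
--     # bound, test primality directly by odd divisors up to sqrt(p); no sieve
--     # array is built.
--     total = 0
--     for i in range(1, (n - 2) // 2 + 1):
--         p = 2 * i + 1
--         d = 3
--         is_prime = True
--         while d * d <= p:
--             if p % d == 0:
--                 is_prime = False
--                 break
--             d += 2
--         if is_prime:
--             total += p // 2
--     return total
-- ===== Notes on version B (the rewrite author's own statement) =====
-- stated objective: simpler
-- what changed: Replaces the Sieve-of-Sundaram marking array (nested marking loops plus a final scan) by a single pass that tests each odd candidate 2*i+1 directly with trial division by odd divisors up to sqrt(p).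
import Mathlib
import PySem

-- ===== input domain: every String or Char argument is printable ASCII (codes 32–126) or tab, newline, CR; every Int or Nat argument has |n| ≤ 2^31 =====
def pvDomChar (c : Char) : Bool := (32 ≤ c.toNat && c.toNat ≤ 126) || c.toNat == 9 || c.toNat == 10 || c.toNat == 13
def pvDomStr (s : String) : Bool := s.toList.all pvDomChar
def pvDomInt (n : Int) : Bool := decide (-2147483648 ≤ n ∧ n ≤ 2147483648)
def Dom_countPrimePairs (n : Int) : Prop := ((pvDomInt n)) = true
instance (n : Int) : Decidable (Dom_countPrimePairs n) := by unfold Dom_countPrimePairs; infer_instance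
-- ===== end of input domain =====

-- B replaces A's Sieve-of-Sundaram marking array by direct trial division of each odd candidate (objective: simpler — no auxiliary array, one pass).

-- ===== PORT A =====
-- inner 'for j in range(i, nNew)' loop of SieveOfSundaram, with its break;
-- the index i + j + 2*i*j is always in range (3 ≤ it ≤ nNew < len(marked)), so pySetD is exact
def pvSieveInner (i nNew : Int) (marked : List Bool) : List Int → List Bool
  | [] => marked
  | j :: js =>
    if i + j + 2 * i * j > nNew then marked
    else pvSieveInner i nNew (PySem.List.pySetD marked (i + j + 2 * i * j) true) js

def pvSieveOfSundaram (marked : List Bool) (nNew : Int) : List Bool :=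
  (PySem.List.pyRange 1 (nNew + 1) 1).foldl
    (fun m i => pvSieveInner i nNew m (PySem.List.pyRange i nNew 1)) marked

def countPrimePairs (n : Int) : Int :=
  let nNew := PySem.Int.floordiv (n - 2) 2
  let marked := (PySem.List.pyRange 0 (nNew + 1) 1).map (fun _ => false)
  let m := pvSieveOfSundaram marked nNew
  -- counting loop; marked[i] read is always in range (1 ≤ i ≤ nNew), so pyGetD is exact
  (PySem.List.pyRange 1 (nNew + 1) 1).foldl
    (fun count i =>
      if (PySem.List.pyGetD m i false) == false then
        count + PySem.Int.floordiv (2 * i + 1) 2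
      else count) 0

-- ===== PORT B =====
-- the 'while d * d <= p' trial-division loop of Source B (break+flag becomes returning false)
def pvIsPrimeTrial (p d : Int) : Bool :=
  if h : d * d ≤ p then
    if PySem.Int.mod p d == 0 then false
    else pvIsPrimeTrial p (d + 2)
  else true
termination_by (p + 1 - d).toNat
decreasing_by
  have h0 : 0 ≤ p := le_trans (mul_self_nonneg d) h
  have h1 : 2 * d ≤ p + 1 := by nlinarith [mul_self_nonneg (d - 1)]
  omega

def countPrimePairs_alt (n : Int) : Int :=
  (PySem.List.pyRange 1 (PySem.Int.floordiv (n - 2) 2 + 1) 1).foldl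
    (fun total i =>
      let p := 2 * i + 1
      if pvIsPrimeTrial p 3 then total + PySem.Int.floordiv p 2 else total) 0

-- ===== PRECONDITION & SPEC =====
def Spec_countPrimePairs (n : Int) (out : Int) : Prop := out = countPrimePairs_alt n
instance (n : Int) (out : Int) : Decidable (Spec_countPrimePairs n out) := by unfold Spec_countPrimePairs; infer_instance

-- ===== CLAIM (what is proved, stated in full; the proofs are below) =====
def Claim_equal_countPrimePairs : Prop := ∀ (n : Int), Dom_countPrimePairs n → Spec_countPrimePairs n (countPrimePairs n)

-- ===== LEMMAS AND PROOFS =====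

lemma pvSieveInner_length (i nNew : Int) :
    ∀ (js : List Int) (m : List Bool), (pvSieveInner i nNew m js).length = m.length := by
  intro js
  induction js with
  | nil => intro m; rfl
  | cons j js ih =>
    intro m
    simp only [pvSieveInner]
    split
    · rfl
    · rw [ih, PySem.List.length_pySetD]

-- reading after an in-range write
lemma pvGetI_set (m : List Bool) (k t : Int) (hk0 : 0 ≤ k)
    (ht0 : 0 ≤ t) (ht : t < (m.length : Int)) :
    PySem.List.pyGetD (PySem.List.pySetD m k true) t false =
      if t = k then true else PySem.List.pyGetD m t false := by
  rw [PySem.List.pySetD_of_nonneg m true hk0]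
  rw [PySem.List.pyGetD_eq_getElem _ false ht0 (by simpa using ht)]
  rw [List.getElem_set]
  split_ifs with h1 h2 h2
  · rfl
  · omega
  · omega
  · rw [PySem.List.pyGetD_eq_getElem m false ht0 ht]

-- the inner loop marks exactly the values i + j + 2*i*j ≤ nNew for j0 ≤ j < nNew
lemma pvSieveInner_getI (i nNew : Int) (hi : 1 ≤ i) :
    ∀ (fuel : Nat) (j0 : Int), fuel = (nNew - j0).toNat → 1 ≤ j0 →
    ∀ (m : List Bool), (m.length : Int) = nNew + 1 → ∀ (t : Int), 0 ≤ t → t ≤ nNew →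
    (PySem.List.pyGetD (pvSieveInner i nNew m (PySem.List.pyRange j0 nNew 1)) t false = true ↔
      PySem.List.pyGetD m t false = true ∨ ∃ j, j0 ≤ j ∧ j < nNew ∧ i + j + 2 * i * j = t) := by
  intro fuel
  induction fuel with
  | zero =>
    intro j0 hf hj0 m hm t ht0 ht
    rw [PySem.List.pyRange_one_eq_nil (by omega)]
    simp only [pvSieveInner]
    constructor
    · exact Or.inl
    · rintro (h | ⟨j, hj1, hj2, _⟩)
      · exact h
      · omega
  | succ fuel ih =>
    intro j0 hf hj0 m hm t ht0 ht
    by_cases hlt : j0 < nNew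
    · rw [PySem.List.pyRange_one_cons hlt]
      simp only [pvSieveInner]
      split
      · -- break: i + j0 + 2*i*j0 > nNew; all later j give even larger values
        rename_i hbig
        constructor
        · exact Or.inl
        · rintro (h | ⟨j, hj1, hj2, hj3⟩)
          · exact h
          · exfalso
            have : (j - j0) * (1 + 2 * i) ≥ 0 :=
              mul_nonneg (by omega) (by omega)
            nlinarith
      · rename_i hbig
        push Not at hbig
        have hv0 : (0:Int) ≤ i + j0 + 2 * i * j0 := by nlinarith
        rw [ih (j0 + 1) (by omega) (by omega) _
            (by rw [PySem.List.length_pySetD]; exact hm) t ht0 ht]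
        rw [pvGetI_set m _ t hv0 ht0 (by omega)]
        constructor
        · rintro (h | ⟨j, hj1, hj2, hj3⟩)
          · split_ifs at h with he
            · exact Or.inr ⟨j0, by omega, hlt, by omega⟩
            · exact Or.inl h
          · exact Or.inr ⟨j, by omega, hj2, hj3⟩
        · rintro (h | ⟨j, hj1, hj2, hj3⟩)
          · exact Or.inl (by split_ifs with he; rfl; exact h)
          · by_cases hj : j = j0
            · subst hj
              exact Or.inl (by split_ifs with he; rfl; omega)
            · exact Or.inr ⟨j, by omega, hj2, hj3⟩
    · rw [PySem.List.pyRange_one_eq_nil (by omega)]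
      simp only [pvSieveInner]
      constructor
      · exact Or.inl
      · rintro (h | ⟨j, hj1, hj2, _⟩)
        · exact h
        · omega

-- the whole sieve marks exactly the values a + b + 2*a*b with i0 ≤ a ≤ b < nNew
lemma pvSundaram_getI (nNew : Int) :
    ∀ (fuel : Nat) (i0 : Int), fuel = (nNew + 1 - i0).toNat → 1 ≤ i0 →
    ∀ (m : List Bool), (m.length : Int) = nNew + 1 → ∀ (t : Int), 0 ≤ t → t ≤ nNew →
    (PySem.List.pyGetD
        ((PySem.List.pyRange i0 (nNew + 1) 1).foldl
          (fun m i => pvSieveInner i nNew m (PySem.List.pyRange i nNew 1)) m) t false = true ↔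
      PySem.List.pyGetD m t false = true ∨
        ∃ a b, i0 ≤ a ∧ a ≤ b ∧ b < nNew ∧ a + b + 2 * a * b = t) := by
  intro fuel
  induction fuel with
  | zero =>
    intro i0 hf hi0 m hm t ht0 ht
    rw [PySem.List.pyRange_one_eq_nil (by omega)]
    simp only [List.foldl_nil]
    constructor
    · exact Or.inl
    · rintro (h | ⟨a, b, h1, h2, h3, _⟩)
      · exact h
      · omega
  | succ fuel ih =>
    intro i0 hf hi0 m hm t ht0 ht
    by_cases hlt : i0 < nNew + 1
    · rw [PySem.List.pyRange_one_cons hlt]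
      simp only [List.foldl_cons]
      have hm1 : ((pvSieveInner i0 nNew m (PySem.List.pyRange i0 nNew 1)).length : Int)
          = nNew + 1 := by rw [pvSieveInner_length]; exact hm
      rw [ih (i0 + 1) (by omega) (by omega) _ hm1 t ht0 ht]
      rw [pvSieveInner_getI i0 nNew hi0 (nNew - i0).toNat i0 rfl hi0 m hm t ht0 ht]
      constructor
      · rintro ((h | ⟨j, hj1, hj2, hj3⟩) | ⟨a, b, h1, h2, h3, h4⟩)
        · exact Or.inl h
        · exact Or.inr ⟨i0, j, le_refl _, hj1, hj2, hj3⟩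
        · exact Or.inr ⟨a, b, by omega, h2, h3, h4⟩
      · rintro (h | ⟨a, b, h1, h2, h3, h4⟩)
        · exact Or.inl (Or.inl h)
        · by_cases ha : a = i0
          · subst ha
            exact Or.inl (Or.inr ⟨b, h2, h3, h4⟩)
          · exact Or.inr ⟨a, b, by omega, h2, h3, h4⟩
    · rw [PySem.List.pyRange_one_eq_nil (by omega)]
      simp only [List.foldl_nil]
      constructor
      · exact Or.inl
      · rintro (h | ⟨a, b, h1, h2, h3, _⟩)
        · exact h
        · omega

-- trial division returns false exactly when some divisor d, d+2, d+4, … with square ≤ p divides p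
lemma pvTrial_false_iff (p : Int) :
    ∀ (d : Int), 1 ≤ d →
    (pvIsPrimeTrial p d = false ↔
      ∃ j : Nat, (d + 2 * (j : Int)) * (d + 2 * (j : Int)) ≤ p ∧ (d + 2 * (j : Int)) ∣ p) := by
  intro d
  induction d using pvIsPrimeTrial.induct p with
  | case1 d hle hdvd =>
    intro hd
    rw [pvIsPrimeTrial, dif_pos hle, if_pos hdvd]
    constructor
    · intro _
      refine ⟨0, ?_, ?_⟩
      · push_cast; simpa using hle
      · push_cast
        simp only [add_zero]
        rw [← PySem.Int.mod_eq_zero_iff_dvd]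
        simpa using hdvd
    · intro _; rfl
  | case2 d hle hdvd ih =>
    intro hd
    rw [pvIsPrimeTrial, dif_pos hle, if_neg hdvd, ih (by omega)]
    constructor
    · rintro ⟨j, h1, h2⟩
      have e : d + 2 * ((j + 1 : Nat) : Int) = d + 2 + 2 * (j : Int) := by push_cast; ring
      exact ⟨j + 1, by rw [e]; exact h1, by rw [e]; exact h2⟩
    · rintro ⟨j, h1, h2⟩
      match j with
      | 0 =>
        exfalso
        push_cast at h2
        simp only [add_zero] at h2
        rw [← PySem.Int.mod_eq_zero_iff_dvd] at h2
        simp [h2] at hdvd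
      | Nat.succ j =>
        have e : d + 2 * ((j + 1 : Nat) : Int) = d + 2 + 2 * (j : Int) := by push_cast; ring
        rw [e] at h1 h2
        exact ⟨j, h1, h2⟩
  | case3 d hle =>
    intro hd
    rw [pvIsPrimeTrial, dif_neg hle]
    constructor
    · intro h; exact absurd h (by simp)
    · rintro ⟨j, h1, _⟩
      exfalso
      have hj : (0:Int) ≤ (j : Int) := Int.natCast_nonneg j
      nlinarith [mul_nonneg hj (by omega : (0:Int) ≤ d), mul_nonneg hj hj]

-- i is a Sundaram-marked value iff 2*i+1 has an odd divisor 3+2*j with square ≤ 2*i+1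
lemma pvBridge (t : Int) :
    ((∃ a b : Int, 1 ≤ a ∧ a ≤ b ∧ a + b + 2 * a * b = t) ↔
      ∃ j : Nat, (3 + 2 * (j : Int)) * (3 + 2 * (j : Int)) ≤ 2 * t + 1 ∧
        (3 + 2 * (j : Int)) ∣ (2 * t + 1)) := by
  constructor
  · rintro ⟨a, b, ha, hab, heq⟩
    have ja : (((a - 1).toNat : Int)) = a - 1 := Int.toNat_of_nonneg (by omega)
    have he : (3 : Int) + 2 * ((a - 1).toNat : Int) = 2 * a + 1 := by rw [ja]; ring
    have hprod : 2 * t + 1 = (2 * a + 1) * (2 * b + 1) := by rw [← heq]; ring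
    refine ⟨(a - 1).toNat, ?_, ?_⟩
    · rw [he, hprod]
      nlinarith [mul_nonneg (by omega : (0:Int) ≤ 2 * a + 1) (by omega : (0:Int) ≤ b - a)]
    · rw [he]
      exact ⟨2 * b + 1, hprod⟩
  · rintro ⟨j, h1, h2⟩
    obtain ⟨f, hf⟩ := h2
    have hje : (0:Int) ≤ (j : Int) := Int.natCast_nonneg j
    have hef : (3 : Int) + 2 * (j : Int) ≤ f := by
      by_contra hc
      push Not at hc
      nlinarith [h1, hf]
    have hodd : Odd f := by
      have : Odd ((3 + 2 * (j : Int)) * f) := by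
        rw [← hf]; exact ⟨t, by ring⟩
      exact (Int.odd_mul.mp this).2
    obtain ⟨b, hb⟩ := hodd
    refine ⟨(j : Int) + 1, b, by omega, by omega, ?_⟩
    have key : 2 * t + 1 = (3 + 2 * (j : Int)) * (2 * b + 1) := by rw [← hb]; exact hf
    have h2t : 2 * (((j : Int) + 1) + b + 2 * ((j : Int) + 1) * b) = 2 * t := by
      linear_combination -key
    linarith

theorem countPrimePairs_spec : Claim_equal_countPrimePairs := by
  intro n _
  unfold Spec_countPrimePairs countPrimePairs countPrimePairs_alt
  set N := PySem.Int.floordiv (n - 2) 2 with hNdef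
  show (PySem.List.pyRange 1 (N + 1) 1).foldl
      (fun count i =>
        if (PySem.List.pyGetD
            (pvSieveOfSundaram ((PySem.List.pyRange 0 (N + 1) 1).map (fun _ => false)) N)
            i false) == false then
          count + PySem.Int.floordiv (2 * i + 1) 2
        else count) 0 =
    (PySem.List.pyRange 1 (N + 1) 1).foldl
      (fun total i =>
        if pvIsPrimeTrial (2 * i + 1) 3 then total + PySem.Int.floordiv (2 * i + 1) 2
        else total) 0
  by_cases hN : N ≤ 0
  · rw [show PySem.List.pyRange 1 (N + 1) 1 = [] from PySem.List.pyRange_one_eq_nil (by omega)]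
    rfl
  · have hN1 : 1 ≤ N := by omega
    apply PySem.List.foldl_congr_mem
    intro acc i hi
    rw [PySem.List.mem_pyRange_one] at hi
    have hlen : (( ((PySem.List.pyRange 0 (N + 1) 1).map
        (fun (_ : Int) => false)).length : Int)) = N + 1 := by
      rw [List.length_map, PySem.List.length_pyRange_one]
      omega
    have hchar := pvSundaram_getI N ((N + 1 - 1).toNat) 1 rfl (by norm_num)
      ((PySem.List.pyRange 0 (N + 1) 1).map (fun _ => false)) hlen i (by omega) (by omega)
    have hinit : PySem.List.pyGetD
        ((PySem.List.pyRange 0 (N + 1) 1).map (fun (_ : Int) => false)) i false = false :=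
      PySem.List.pyGetD_map_pyRange_of_nonneg _ (N + 1) i false (by omega) (by omega)
    rw [hinit] at hchar
    simp only [Bool.false_eq_true, false_or] at hchar
    have hdrop : (∃ a b, 1 ≤ a ∧ a ≤ b ∧ b < N ∧ a + b + 2 * a * b = i) ↔
        (∃ a b : Int, 1 ≤ a ∧ a ≤ b ∧ a + b + 2 * a * b = i) := by
      constructor
      · rintro ⟨a, b, h1, h2, h3, h4⟩; exact ⟨a, b, h1, h2, h4⟩
      · rintro ⟨a, b, h1, h2, h4⟩
        refine ⟨a, b, h1, h2, ?_, h4⟩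
        nlinarith [mul_nonneg (by omega : (0:Int) ≤ a) (by omega : (0:Int) ≤ b)]
    have htrial := pvTrial_false_iff (2 * i + 1) 3 (by norm_num)
    have key : PySem.List.pyGetD
        (pvSieveOfSundaram ((PySem.List.pyRange 0 (N + 1) 1).map (fun _ => false)) N)
        i false = true ↔ pvIsPrimeTrial (2 * i + 1) 3 = false := by
      rw [pvSieveOfSundaram, hchar, hdrop, pvBridge i, htrial]
    cases hb : PySem.List.pyGetD
        (pvSieveOfSundaram ((PySem.List.pyRange 0 (N + 1) 1).map (fun _ => false)) N)
        i false with
    | false =>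
      have ht : pvIsPrimeTrial (2 * i + 1) 3 = true := by
        cases htv : pvIsPrimeTrial (2 * i + 1) 3 with
        | false => exact absurd (key.mpr htv) (by rw [hb]; simp)
        | true => rfl
      rw [ht]
      simp
    | true =>
      have ht : pvIsPrimeTrial (2 * i + 1) 3 = false := key.mp hb
      rw [ht]
      simp
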